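-- pv_equiv track=rewrite | github.com/kostiantynkovalchuk/gradus-ai | backend/solomon_search.py | cap_summary
-- ===== SOURCE A (Python) =====
-- def cap_summary(text: str) -> str:
--     text = text.strip()
--     if len(text) <= 250 and text[-1] in '.!?»"':
--         return text
--     for i in range(len(text) - 1, 79, -1):
--         if text[i] == '.':
--             return text[:i + 1]
--     for i in range(len(text) - 1, 79, -1):
--         if text[i] == ',':
--             return text[:i] + '.'
--     for i in range(len(text) - 1, 79, -1):
--         if text[i] == ' ':
--             return text[:i] + '.'
--     return text
-- ===== SOURCE B (Python) =====
-- def cap_summary(text: str) -> str: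
--     text = text.strip()
--     if len(text) <= 250 and text[-1] in '.!?»"':
--         return text
--     # single forward pass: remember the LAST '.', ',' and ' ' at index >= 80
--     dot = comma = space = -1
--     for i, ch in enumerate(text):
--         if i >= 80:
--             if ch == '.':
--                 dot = i
--             elif ch == ',':
--                 comma = i
--             elif ch == ' ':
--                 space = i
--     if dot >= 0:
--         return text[:dot + 1]
--     if comma >= 0:
--         return text[:comma] + '.'
--     if space >= 0:
--         return text[:space] + '.'
--     return text
-- ===== Notes on version B (the rewrite author's own statement) =====
-- stated objective: faster
-- what changed: Replaces A's three separate backward scans (one per delimiter kind) with a single forward pass that records the last period, comma and space index at position >= 80, then decides among the three recorded indices.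
import Mathlib
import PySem

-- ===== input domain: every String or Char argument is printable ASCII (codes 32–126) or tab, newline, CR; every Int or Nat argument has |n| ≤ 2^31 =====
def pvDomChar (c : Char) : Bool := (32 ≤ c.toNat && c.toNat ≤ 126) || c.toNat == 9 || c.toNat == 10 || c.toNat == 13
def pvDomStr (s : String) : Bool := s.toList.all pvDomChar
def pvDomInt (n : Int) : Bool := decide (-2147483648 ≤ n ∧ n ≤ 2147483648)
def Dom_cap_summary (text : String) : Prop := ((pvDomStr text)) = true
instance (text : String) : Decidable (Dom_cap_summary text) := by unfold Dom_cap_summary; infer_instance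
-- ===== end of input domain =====

-- B replaces A's three backward scans by ONE forward pass recording the last period, comma and
-- space index at position >= 80 (measured constant-factor speedup: one pass instead of three).

-- ===== PORT A =====

-- A's backward loop 'for i in idxs: if text[i] == c: return <body at i>' as find-first-match:
def pvFindHit (cs : List Char) (c : Char) : List Int → Option Int
  | [] => none
  | i :: rest => if PySem.List.pyGet? cs i = some c then some i else pvFindHit cs c rest

def cap_summary (text : String) : String :=
  let t := PySem.Str.strip text
  if PySem.Str.len t ≤ 250 then
    match PySem.Str.pyGet? t (-1) with
    | none => ""                                   -- IndexError (t = ""); excluded by Pre_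
    | some last =>
      if (".!?»\"".toList.contains last) then t
      else
        match pvFindHit t.toList '.' (PySem.List.pyRange (PySem.Str.len t - 1) 79 (-1)) with
        | some i => PySem.Str.slice t none (some (i + 1))
        | none =>
          match pvFindHit t.toList ',' (PySem.List.pyRange (PySem.Str.len t - 1) 79 (-1)) with
          | some i => PySem.Str.slice t none (some i) ++ "."
          | none =>
            match pvFindHit t.toList ' ' (PySem.List.pyRange (PySem.Str.len t - 1) 79 (-1)) with
            | some i => PySem.Str.slice t none (some i) ++ "."
            | none => t
  else
    match pvFindHit t.toList '.' (PySem.List.pyRange (PySem.Str.len t - 1) 79 (-1)) with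
    | some i => PySem.Str.slice t none (some (i + 1))
    | none =>
      match pvFindHit t.toList ',' (PySem.List.pyRange (PySem.Str.len t - 1) 79 (-1)) with
      | some i => PySem.Str.slice t none (some i) ++ "."
      | none =>
        match pvFindHit t.toList ' ' (PySem.List.pyRange (PySem.Str.len t - 1) 79 (-1)) with
        | some i => PySem.Str.slice t none (some i) ++ "."
        | none => t

-- ===== PORT B =====

-- one step of B's forward pass: update (dot, comma, space) with (i, ch)
def pvStep (acc : Int × Int × Int) (p : Int × Char) : Int × Int × Int :=
  if 80 ≤ p.1 then
    if p.2 = '.' then (p.1, acc.2.1, acc.2.2)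
    else if p.2 = ',' then (acc.1, p.1, acc.2.2)
    else if p.2 = ' ' then (acc.1, acc.2.1, p.1)
    else acc
  else acc

def cap_summary_alt (text : String) : String :=
  let t := PySem.Str.strip text
  if PySem.Str.len t ≤ 250 then
    match PySem.Str.pyGet? t (-1) with
    | none => ""                                   -- IndexError (t = ""); excluded by Pre_
    | some last =>
      if (".!?»\"".toList.contains last) then t
      else
        let st := (PySem.List.enumerate t.toList 0).foldl pvStep (-1, -1, -1)
        if 0 ≤ st.1 then PySem.Str.slice t none (some (st.1 + 1))
        else if 0 ≤ st.2.1 then PySem.Str.slice t none (some st.2.1) ++ "."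
        else if 0 ≤ st.2.2 then PySem.Str.slice t none (some st.2.2) ++ "."
        else t
  else
    let st := (PySem.List.enumerate t.toList 0).foldl pvStep (-1, -1, -1)
    if 0 ≤ st.1 then PySem.Str.slice t none (some (st.1 + 1))
    else if 0 ≤ st.2.1 then PySem.Str.slice t none (some st.2.1) ++ "."
    else if 0 ≤ st.2.2 then PySem.Str.slice t none (some st.2.2) ++ "."
    else t

-- ===== PRECONDITION & SPEC =====
-- Pre_ excludes exactly the inputs that strip to the empty string, on which A's last-character test raises IndexError.
def Pre_cap_summary (text : String) : Prop := PySem.Str.strip text ≠ ""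
instance (text : String) : Decidable (Pre_cap_summary text) := by unfold Pre_cap_summary; infer_instance
def pvWitness_cap_summary : String := "Hello there."

def Spec_cap_summary (text : String) (out : String) : Prop := out = cap_summary_alt text
instance (text : String) (out : String) : Decidable (Spec_cap_summary text out) := by unfold Spec_cap_summary; infer_instance

-- ===== CLAIM (what is proved, stated in full; the proofs are below) =====
def Claim_equal_cap_summary : Prop := ∀ (text : String), Dom_cap_summary text → Pre_cap_summary text → Spec_cap_summary text (cap_summary text)

-- ===== LEMMAS AND PROOFS =====

-- B's single fold component for one target character c
def pvG (cs : List Char) (c : Char) : Int :=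
  (PySem.List.enumerate cs 0).foldl (fun a p => if 80 ≤ p.1 ∧ p.2 = c then p.1 else a) (-1)

theorem pvStep_componentwise (acc : Int × Int × Int) (p : Int × Char) :
    pvStep acc p = (if 80 ≤ p.1 ∧ p.2 = '.' then p.1 else acc.1,
                    if 80 ≤ p.1 ∧ p.2 = ',' then p.1 else acc.2.1,
                    if 80 ≤ p.1 ∧ p.2 = ' ' then p.1 else acc.2.2) := by
  rcases acc with ⟨d, c, s⟩; rcases p with ⟨i, ch⟩
  simp only [pvStep]
  split_ifs <;> simp_all

theorem foldl_pvStep (l : List (Int × Char)) (d c s : Int) :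
    l.foldl pvStep (d, c, s) =
      (l.foldl (fun a p => if 80 ≤ p.1 ∧ p.2 = '.' then p.1 else a) d,
       l.foldl (fun a p => if 80 ≤ p.1 ∧ p.2 = ',' then p.1 else a) c,
       l.foldl (fun a p => if 80 ≤ p.1 ∧ p.2 = ' ' then p.1 else a) s) := by
  induction l generalizing d c s with
  | nil => rfl
  | cons p l ih => simp only [List.foldl_cons, pvStep_componentwise]; exact ih _ _ _

theorem pvFindHit_append_lt (xs : List Char) (x c : Char) (idxs : List Int)
    (h : ∀ i ∈ idxs, 0 ≤ i ∧ i < (xs.length : Int)) :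
    pvFindHit (xs ++ [x]) c idxs = pvFindHit xs c idxs := by
  induction idxs with
  | nil => rfl
  | cons i rest ih =>
    have hi := h i (by simp)
    have hget : PySem.List.pyGet? (xs ++ [x]) i = PySem.List.pyGet? xs i := by
      rw [PySem.List.pyGet?_of_nonneg _ hi.1, PySem.List.pyGet?_of_nonneg _ hi.1]
      rw [List.getElem?_append_left (by omega)]
    simp only [pvFindHit, hget]
    split
    · rfl
    · exact ih (fun j hj => h j (by simp [hj]))

-- core: A's backward find-first over range(len-1, 79, -1) = B's forward fold (last match ≥ 80)
theorem pvFindHit_eq_pvG (cs : List Char) (c : Char) :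
    pvFindHit cs c (PySem.List.pyRange ((cs.length : Int) - 1) 79 (-1)) =
      (if 0 ≤ pvG cs c then some (pvG cs c) else none) ∧
    (cs.length ≤ 80 → pvG cs c = -1) := by
  induction cs using List.reverseRecOn with
  | nil =>
    constructor
    · rw [PySem.List.pyRange_neg_one_eq_nil (by norm_num)]
      simp [pvFindHit, pvG, PySem.List.enumerate]
    · intro _; rfl
  | append_singleton xs x ih =>
    have hlen : ((xs ++ [x]).length : Int) - 1 = (xs.length : Int) := by simp
    have hG : pvG (xs ++ [x]) c =
        if 80 ≤ (xs.length : Int) ∧ x = c then (xs.length : Int) else pvG xs c := by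
      simp only [pvG, PySem.List.enumerate_append, List.foldl_append]
      simp [PySem.List.enumerate]
    by_cases hL : (xs.length : Int) ≤ 79
    · -- range empty; everything in xs is below index 80 too
      have hGxs : pvG xs c = -1 := ih.2 (by omega)
      constructor
      · rw [hlen, PySem.List.pyRange_neg_one_eq_nil hL]
        have : pvG (xs ++ [x]) c = -1 := by
          rw [hG, if_neg (by omega), hGxs]
        simp [pvFindHit, this]
      · intro _
        rw [hG, if_neg (by omega), hGxs]
    · -- 80 ≤ xs.length: range = xs.length :: range(xs.length - 1, 79, -1)
      have h80 : (80 : Int) ≤ (xs.length : Int) := by omega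
      constructor
      · rw [hlen, PySem.List.pyRange_neg_one_cons (by omega)]
        have hget : PySem.List.pyGet? (xs ++ [x]) (xs.length : Int) = some x := by
          rw [PySem.List.pyGet?_of_nonneg _ (by positivity)]
          simp
        by_cases hx : x = c
        · subst hx
          have hGv : pvG (xs ++ [x]) x = (xs.length : Int) := by
            rw [hG]; simp [h80]
          simp [pvFindHit, hGv]
        · have hGv : pvG (xs ++ [x]) c = pvG xs c := by
            rw [hG]; simp [hx]
          simp only [pvFindHit, hget, hGv]
          rw [if_neg (by simp [hx])]
          rw [pvFindHit_append_lt xs x c _ (fun i hi => by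
            have := (PySem.List.mem_pyRange_neg_one).1 hi
            omega)]
          exact ih.1
      · intro hshort; simp at hshort; omega

-- ===== VERDICT (by name: the statement is the Claim_ definition above) =====
theorem cap_summary_spec : Claim_equal_cap_summary := by
  intro text _ _
  unfold Spec_cap_summary cap_summary cap_summary_alt
  set t := PySem.Str.strip text with ht
  have hfold : (PySem.List.enumerate t.toList 0).foldl pvStep (-1, -1, -1)
      = (pvG t.toList '.', pvG t.toList ',', pvG t.toList ' ') := by
    rw [foldl_pvStep]; rfl
  have hd := pvFindHit_eq_pvG t.toList '.'
  have hc := pvFindHit_eq_pvG t.toList ','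
  have hs := pvFindHit_eq_pvG t.toList ' '
  have hlen : PySem.Str.len t = (t.toList.length : Int) := by
    simp [PySem.Str.len_eq]
  simp only [hlen] at *
  have hbody :
      (match pvFindHit t.toList '.' (PySem.List.pyRange ((t.toList.length : Int) - 1) 79 (-1)) with
        | some i => PySem.Str.slice t none (some (i + 1))
        | none =>
          match pvFindHit t.toList ',' (PySem.List.pyRange ((t.toList.length : Int) - 1) 79 (-1)) with
          | some i => PySem.Str.slice t none (some i) ++ "."
          | none =>
            match pvFindHit t.toList ' ' (PySem.List.pyRange ((t.toList.length : Int) - 1) 79 (-1)) with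
            | some i => PySem.Str.slice t none (some i) ++ "."
            | none => t) =
      (let st := (PySem.List.enumerate t.toList 0).foldl pvStep (-1, -1, -1)
        if 0 ≤ st.1 then PySem.Str.slice t none (some (st.1 + 1))
        else if 0 ≤ st.2.1 then PySem.Str.slice t none (some st.2.1) ++ "."
        else if 0 ≤ st.2.2 then PySem.Str.slice t none (some st.2.2) ++ "."
        else t) := by
    rw [hfold, hd.1, hc.1, hs.1]
    generalize pvG t.toList '.' = g1
    generalize pvG t.toList ',' = g2
    generalize pvG t.toList ' ' = g3
    by_cases h1 : 0 ≤ g1 <;> by_cases h2 : 0 ≤ g2 <;> by_cases h3 : 0 ≤ g3 <;>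
      simp [h1, h2, h3]
  split
  · split
    · rfl
    · split
      · rfl
      · exact hbody
  · exact hbody
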